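-- pv_equiv track=rewrite | github.com/BlueJayXRStudio/UnityCICD | Tools/parsers/indentation_formatter.py | indentation_formatter
-- ===== SOURCE A (Python) =====
-- def indentation_formatter(text, tab_size=3, max_budget=29):
--     """
--     AI can't write this.
--     """
--     text = text.replace('\r\n', '\n').replace('\r', '\n') # deal with carriage returns
--
--     stack = 0 # quote-unquote 'Stack'
--     curr_budget = max_budget
--     state = "TABBING" # TABBING, PARSING
--     index = 0
--     parsed = []
--
--     while index < len(text):
--         if text[index] == '\n':
--             stack = 0
--             curr_budget = max_budget
--             state = "TABBING"
--             parsed.append('\n')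
--             index += 1
--             continue
--         if state == "TABBING":
--             if text[index] == '\t':
--                 stack += 1
--                 index += 1
--             elif index+3 < len(text) and text[index:index+4] == '    ': # Handle 4-space indentations
--                 stack += 1
--                 index += 4
--             else:
--                 state = "PARSING"
--         elif state == "PARSING":
--             # Ignore tabs between paragraph. There's probably some edge
--             # case here somewhere regarding the number of indentations.
--             if text[index] != '\t':
--                 if curr_budget == max_budget:
--                     parsed.extend([' ' for i in range(stack * tab_size)])
--                     curr_budget -= stack * tab_size
--                 parsed.append(text[index])
--                 curr_budget -= 1
--                 if curr_budget == 0: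
--                     if (
--                         index+1 < len(text) and
--                         text[index] != ' ' and
--                         text[index].isalpha() and
--                         text[index+1] != ' ' and
--                         text[index+1].isalpha()
--                     ):
--                         parsed.append('-') # Hyphen
--                     curr_budget = max_budget
--                     parsed.append('\n')
--             index += 1
--
--     return ''.join(parsed)
-- ===== SOURCE B (Python) =====
-- def _scan_indent(line):
--     # leading indentation: each '\t' or each full group of four spaces = one level
--     i = 0
--     stack = 0
--     while True:
--         if i < len(line) and line[i] == '\t':
--             stack += 1
--             i += 1
--         elif line[i:i + 4] == '    ':
--             stack += 1
--             i += 4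
--         else:
--             return stack, line[i:]
--
--
-- def _pairs(rest):
--     # non-tab content chars of the line, each with "is the immediately following char alphabetic"
--     out = []
--     for j, c in enumerate(rest):
--         if c != '\t':
--             out.append((c, j + 1 < len(rest) and rest[j + 1].isalpha()))
--     return out
--
--
-- def _wrap(pairs, stack, tab_size, max_budget):
--     out = []
--     budget = max_budget
--     for ch, next_alpha in pairs:
--         if budget == max_budget:
--             out.append(' ' * (stack * tab_size))
--             budget -= stack * tab_size
--         out.append(ch)
--         budget -= 1
--         if budget == 0:
--             if ch.isalpha() and next_alpha:
--                 out.append('-')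
--             out.append('\n')
--             budget = max_budget
--     return ''.join(out)
--
--
-- def indentation_formatter(text, tab_size=3, max_budget=29):
--     text = text.replace('\r\n', '\n').replace('\r', '\n')
--     formatted = []
--     for line in text.split('\n'):
--         stack, rest = _scan_indent(line)
--         formatted.append(_wrap(_pairs(rest), stack, tab_size, max_budget))
--     return '\n'.join(formatted)
-- ===== Notes on version B (the rewrite author's own statement) =====
-- stated objective: alternative
-- what changed: Replaces the single global index/state-machine while-loop by a per-line decomposition of similar size and cost: split the normalized text on newlines, and for each line scan the leading indentation once, pre-compute for each content char whether its successor is alphabetic, then run a plain budget fold; lines are rejoined with newlines.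
import Mathlib
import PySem

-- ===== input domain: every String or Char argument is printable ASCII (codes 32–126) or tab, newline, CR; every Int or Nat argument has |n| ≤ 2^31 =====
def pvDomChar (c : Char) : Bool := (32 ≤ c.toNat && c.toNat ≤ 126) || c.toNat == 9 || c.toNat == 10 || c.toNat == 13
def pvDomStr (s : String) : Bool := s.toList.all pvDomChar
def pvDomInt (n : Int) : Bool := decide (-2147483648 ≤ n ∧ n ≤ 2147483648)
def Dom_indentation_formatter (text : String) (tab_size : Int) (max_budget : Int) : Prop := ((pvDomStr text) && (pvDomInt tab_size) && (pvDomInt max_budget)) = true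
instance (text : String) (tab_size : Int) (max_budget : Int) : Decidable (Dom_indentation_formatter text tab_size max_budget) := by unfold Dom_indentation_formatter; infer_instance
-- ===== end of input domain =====

-- B re-structures A's global index/state-machine loop as an independent per-line pass
-- (indent scan, successor-is-alpha pre-computation, budget fold), rejoined with '\n'; same output.

-- ===== PORT A =====
-- the while-loop of A: state = TABBING (true) / PARSING (false); the '\n' test comes first;
-- the TABBING→PARSING switch re-examines the same index, so the measure counts the state too.
def pvLoopA (tab mx : Int) : List Char → Bool → Int → Int → List Char
  | [], _, _, _ => []
  | c :: t, tabbing, stack, budget =>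
    if c = '\n' then '\n' :: pvLoopA tab mx t true 0 mx
    else if tabbing then
      if c = '\t' then pvLoopA tab mx t true (stack + 1) budget
      else if c = ' ' ∧ t.take 3 = [' ', ' ', ' '] then  -- text[index:index+4] == '    '
        pvLoopA tab mx (t.drop 3) true (stack + 1) budget
      else pvLoopA tab mx (c :: t) false stack budget
    else
      if c = '\t' then pvLoopA tab mx t false stack budget
      else
        let pre : List Char := if budget = mx then List.replicate ((stack * tab).toNat) ' ' else []
        let b1 : Int := (if budget = mx then budget - stack * tab else budget) - 1
        if b1 = 0 then
          let hyph : Bool := match t with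
            | [] => false  -- index+1 < len(text) fails
            | d :: _ => (c != ' ') && PySem.Chars.isalpha c && (d != ' ') && PySem.Chars.isalpha d
          pre ++ c :: ((if hyph then ['-'] else []) ++ '\n' :: pvLoopA tab mx t false stack mx)
        else pre ++ c :: pvLoopA tab mx t false stack b1
  termination_by rest tabbing _ _ => 2 * rest.length + (if tabbing then 1 else 0)
  decreasing_by all_goals simp_all [List.length_drop] <;> omega

def indentation_formatter (text : String) (tab_size : Int) (max_budget : Int) : String :=
  let t := PySem.Str.replace (PySem.Str.replace text "\r\n" "\n") "\r" "\n"
  String.mk (pvLoopA tab_size max_budget t.toList true 0 max_budget)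

-- ===== PORT B =====
-- _scan_indent: leading '\t' or four-space groups, tail-recursive like Source B's while loop
def pvScanIndent : List Char → Int → Int × List Char
  | '\t' :: t, s => pvScanIndent t (s + 1)
  | ' ' :: ' ' :: ' ' :: ' ' :: t, s => pvScanIndent t (s + 1)
  | l, s => (s, l)

def pvNextAlpha : List Char → Bool
  | [] => false
  | d :: _ => PySem.Chars.isalpha d

-- _pairs: non-tab chars with "next char is alphabetic"
def pvPairs : List Char → List (Char × Bool)
  | [] => []
  | c :: t => if c = '\t' then pvPairs t else (c, pvNextAlpha t) :: pvPairs t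

-- _wrap: plain budget fold over the pairs
def pvWrap (tab mx : Int) : List (Char × Bool) → Int → Int → List Char
  | [], _, _ => []
  | (c, na) :: ps, stack, budget =>
    let pre : List Char := if budget = mx then List.replicate ((stack * tab).toNat) ' ' else []
    let b1 : Int := (if budget = mx then budget - stack * tab else budget) - 1
    if b1 = 0 then
      pre ++ c :: ((if PySem.Chars.isalpha c && na then ['-'] else []) ++ '\n' :: pvWrap tab mx ps stack mx)
    else pre ++ c :: pvWrap tab mx ps stack b1

def pvFormatLine (tab mx : Int) (l : List Char) : List Char :=
  let sr := pvScanIndent l 0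
  pvWrap tab mx (pvPairs sr.2) sr.1 mx

def indentation_formatter_alt (text : String) (tab_size : Int) (max_budget : Int) : String :=
  let t := PySem.Str.replace (PySem.Str.replace text "\r\n" "\n") "\r" "\n"
  String.mk (PySem.Chars.join ['\n']
    ((t.toList.splitOn '\n').map (pvFormatLine tab_size max_budget)))

-- ===== PRECONDITION & SPEC =====
def Spec_indentation_formatter (text : String) (tab_size : Int) (max_budget : Int) (out : String) : Prop := out = indentation_formatter_alt text tab_size max_budget
instance (text : String) (tab_size : Int) (max_budget : Int) (out : String) : Decidable (Spec_indentation_formatter text tab_size max_budget out) := by unfold Spec_indentation_formatter; infer_instance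

-- ===== CLAIM (what is proved, stated in full; the proofs are below) =====
def Claim_equal_indentation_formatter : Prop := ∀ (text : String) (tab_size : Int) (max_budget : Int), Dom_indentation_formatter text tab_size max_budget → Spec_indentation_formatter text tab_size max_budget (indentation_formatter text tab_size max_budget)

-- ===== LEMMAS AND PROOFS =====

-- a suffix that is empty or starts with '\n': the line boundary as pvLoopA sees it
def pvSufOK (suf : List Char) : Prop := suf = [] ∨ ∃ t, suf = '\n' :: t

theorem pvLoopA_state_irrel (tab mx : Int) (suf : List Char) (h : pvSufOK suf)
    (s s' b b' : Int) :
    pvLoopA tab mx suf true s b = pvLoopA tab mx suf false s' b' := by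
  rcases h with h | ⟨t, h⟩ <;> subst h
  · rw [pvLoopA.eq_def, pvLoopA.eq_def]
  · rw [pvLoopA.eq_def, pvLoopA.eq_def]; simp

theorem pvScanIndent_fallback (l : List Char) (s : Int)
    (h1 : ∀ t : List Char, l ≠ '\t' :: t)
    (h2 : ∀ t : List Char, l ≠ ' ' :: ' ' :: ' ' :: ' ' :: t) :
    pvScanIndent l s = (s, l) := by
  rw [pvScanIndent.eq_def]
  split
  · exact ((h1 _ rfl).elim)
  · exact ((h2 _ rfl).elim)
  · rfl

theorem pvScanIndent_suffix : ∀ (l : List Char) (s : Int), (pvScanIndent l s).2 <:+ l := by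
  intro l s
  induction l, s using pvScanIndent.induct with
  | case1 t s ih => rw [pvScanIndent]; exact ih.trans (List.suffix_cons _ _)
  | case2 t s ih =>
      rw [pvScanIndent]
      exact ih.trans ((List.suffix_cons _ _).trans ((List.suffix_cons _ _).trans
        ((List.suffix_cons _ _).trans (List.suffix_cons _ _))))
  | case3 l s h1 h2 =>
      rw [pvScanIndent_fallback l s (fun t h => h1 t h) (fun t h => h2 t h)]

-- TABBING phase = pvScanIndent, for any boundary suffix
theorem pvLoopA_tabbing (tab mx : Int) (suf : List Char) (hs : pvSufOK suf) :
    ∀ (l : List Char) (s : Int), ∀ b : Int,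
    pvLoopA tab mx (l ++ suf) true s b
      = pvLoopA tab mx ((pvScanIndent l s).2 ++ suf) false (pvScanIndent l s).1 b := by
  intro l s
  induction l, s using pvScanIndent.induct with
  | case1 t s ih =>
    intro b
    rw [pvScanIndent, List.cons_append]
    conv_lhs => rw [pvLoopA.eq_def]
    simpa using ih b
  | case2 t s ih =>
    intro b
    rw [pvScanIndent,
      show ((' ' :: ' ' :: ' ' :: ' ' :: t) ++ suf) = ' ' :: (' ' :: ' ' :: ' ' :: t ++ suf) by simp]
    conv_lhs => rw [pvLoopA.eq_def]
    simpa using ih b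
  | case3 l s h1 h2 =>
    intro b
    rw [pvScanIndent_fallback l s (fun t h => h1 t h) (fun t h => h2 t h)]
    rcases l with _ | ⟨c, t⟩
    · exact pvLoopA_state_irrel tab mx suf hs s s b b
    · by_cases hn : c = '\n'
      · subst hn
        conv_lhs => rw [pvLoopA.eq_def]
        conv_rhs => rw [pvLoopA.eq_def]
        simp
      · have hcT : c ≠ '\t' := fun h => h1 t (by rw [h])
        have h4 : ¬(c = ' ' ∧ (t ++ suf).take 3 = [' ', ' ', ' ']) := by
          rintro ⟨hc, htake⟩
          subst hc
          rcases t with _ | ⟨a, _ | ⟨a2, _ | ⟨a3, t'⟩⟩⟩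
          · rcases hs with h | ⟨r, h⟩ <;> subst h <;> simp_all
          · rcases hs with h | ⟨r, h⟩ <;> subst h <;> simp_all
          · rcases hs with h | ⟨r, h⟩ <;> subst h <;> simp_all
          · simp only [List.cons_append, List.take_succ_cons, List.take_zero] at htake
            obtain ⟨ha, ha2, ha3⟩ : a = ' ' ∧ a2 = ' ' ∧ a3 = ' ' := by
              injection htake with x1 rest; injection rest with x2 rest2
              injection rest2 with x3 _
              exact ⟨x1, x2, x3⟩
            exact h2 t' (by rw [ha, ha2, ha3])
        rw [List.cons_append]
        conv_lhs => rw [pvLoopA.eq_def]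
        simp only [hn, hcT, h4, if_false, if_true]

-- the hyphen tests collapse: alpha chars are never ' '
theorem pvAlpha_ne_space (c : Char) : ((c != ' ') && PySem.Chars.isalpha c) = PySem.Chars.isalpha c := by
  by_cases hc : c = ' '
  · subst hc; decide
  · simp [hc]

theorem pvHyph_eq (c : Char) (t suf : List Char) (hs : pvSufOK suf) :
    (match t ++ suf with
      | [] => false
      | d :: _ => (c != ' ') && PySem.Chars.isalpha c && (d != ' ') && PySem.Chars.isalpha d)
      = (PySem.Chars.isalpha c && pvNextAlpha t) := by
  rcases t with _ | ⟨d, t'⟩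
  · rcases hs with h | ⟨r, h⟩ <;> subst h
    · simp [pvNextAlpha]
    · simp only [List.nil_append, pvNextAlpha]
      have hna : PySem.Chars.isalpha '\n' = false := by decide
      simp [hna]
  · simp only [List.cons_append, pvNextAlpha]
    rw [pvAlpha_ne_space, Bool.and_assoc, pvAlpha_ne_space]

-- PARSING phase on a newline-free line = pvWrap over pvPairs
theorem pvLoopA_parsing (tab mx : Int) (suf : List Char) (hs : pvSufOK suf) :
    ∀ (l : List Char), '\n' ∉ l → ∀ (s b : Int),
    pvLoopA tab mx (l ++ suf) false s b
      = pvWrap tab mx (pvPairs l) s b ++ pvLoopA tab mx suf true 0 mx := by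
  intro l
  induction l with
  | nil =>
    intro _ s b
    simp only [List.nil_append, pvPairs, pvWrap]
    exact (pvLoopA_state_irrel tab mx suf hs 0 s mx b).symm
  | cons c t ih =>
    intro hnl s b
    simp only [List.mem_cons, not_or] at hnl
    obtain ⟨hcn, htn⟩ := hnl
    have htn' : '\n' ∉ t := htn
    rw [List.cons_append]
    conv_lhs => rw [pvLoopA.eq_def]
    by_cases hct : c = '\t'
    · simp only [hct, if_true]
      rw [pvPairs]
      simp only [if_true]
      exact ih htn' s b
    · simp only [hct]
      rw [pvPairs]
      simp only [hct, ite_false]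
      have hcn' : c ≠ '\n' := fun h => hcn h.symm
      rw [pvHyph_eq c t suf hs, pvWrap]
      by_cases hb : ((if b = mx then b - s * tab else b) - 1) = 0
      · simp only [hb, ite_true, ih htn', List.append_assoc, List.cons_append]
        rw [if_neg hcn']
        simp
      · simp only [hb, ite_false, ih htn', List.append_assoc, List.cons_append]
        rw [if_neg hcn']
        simp

-- whole-text lemma: the global loop equals the per-line formatting joined by '\n'
theorem pvLoopA_lines (tab mx : Int) : ∀ (cs : List Char),
    pvLoopA tab mx cs true 0 mx
      = PySem.Chars.join ['\n'] ((cs.splitOn '\n').map (pvFormatLine tab mx)) := by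
  intro cs
  generalize hn : cs.length = n
  induction n using Nat.strong_induction_on generalizing cs with
  | _ n ih =>
  subst hn
  set p : Char → Bool := fun c => c != '\n' with hp
  have hsplitcs := (List.takeWhile_append_dropWhile (p := p) (l := cs)).symm
  have hnlTake : '\n' ∉ cs.takeWhile p := by
    intro hmem
    have := List.mem_takeWhile_imp hmem
    simp [hp] at this
  have hscan2 : '\n' ∉ ((pvScanIndent (cs.takeWhile p) 0).2 : List Char) := by
    intro hmem
    exact hnlTake ((pvScanIndent_suffix (cs.takeWhile p) 0).subset hmem)
  rcases hdrop : cs.dropWhile p with _ | ⟨d, r⟩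
  · -- no newline: a single line
    have hcs : cs = cs.takeWhile p := by
      conv_lhs => rw [hsplitcs]
      rw [hdrop, List.append_nil]
    have hsingle : cs.splitOn '\n' = [cs] := by
      apply List.splitOnP_eq_single
      intro x hx
      have : x ≠ '\n' := by
        intro h; subst h
        rw [hcs] at hx; exact hnlTake hx
      simp [this]
    rw [hsingle]
    simp only [List.map_cons, List.map_nil, PySem.Chars.join]
    rw [show (List.intercalate ['\n'] [pvFormatLine tab mx cs] : List Char) = pvFormatLine tab mx cs by
      simp [List.intercalate]]
    conv_lhs => rw [hcs, show (cs.takeWhile p : List Char) = cs.takeWhile p ++ [] by simp]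
    rw [pvLoopA_tabbing tab mx [] (Or.inl rfl)]
    rw [pvLoopA_parsing tab mx [] (Or.inl rfl) _ hscan2]
    rw [pvLoopA.eq_def]
    simp only [pvFormatLine, List.append_nil]
    rw [← hcs]
  · -- cs = line ++ '\n' :: rest
    have hd : d = '\n' := by
      have := List.head_dropWhile_not p (l := cs) (by simp [hdrop])
      simp only [hdrop, List.head_cons] at this
      simpa [hp] using this
    subst hd
    have hcs : cs = cs.takeWhile p ++ '\n' :: r := by
      conv_lhs => rw [hsplitcs]; rw [hdrop]
    have hlen : r.length < cs.length := by
      conv_rhs => rw [hcs]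
      simp [List.length_append]
      omega
    have hsplit : cs.splitOn '\n' = (cs.takeWhile p) :: r.splitOn '\n' := by
      conv_lhs => rw [hcs]
      apply List.splitOnP_first
      · intro x hx
        have : x ≠ '\n' := by
          intro h; subst h; exact hnlTake hx
        simp [this]
      · simp
    rw [hsplit]
    obtain ⟨b0, r0, hr0⟩ : ∃ b0 r0, r.splitOn '\n' = b0 :: r0 :=
      List.exists_cons_of_ne_nil (List.splitOnP_ne_nil _ r)
    have hjoin : PySem.Chars.join ['\n']
        ((cs.takeWhile p :: r.splitOn '\n').map (pvFormatLine tab mx))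
        = pvFormatLine tab mx (cs.takeWhile p) ++ '\n'
            :: PySem.Chars.join ['\n'] ((r.splitOn '\n').map (pvFormatLine tab mx)) := by
      rw [hr0]
      simp only [List.map_cons, PySem.Chars.join]
      rw [show (List.intercalate ['\n'] (pvFormatLine tab mx (cs.takeWhile p)
            :: pvFormatLine tab mx b0 :: r0.map (pvFormatLine tab mx)) : List Char)
          = pvFormatLine tab mx (cs.takeWhile p) ++ ['\n']
            ++ List.intercalate ['\n'] (pvFormatLine tab mx b0 :: r0.map (pvFormatLine tab mx)) by
        simp [List.intercalate]]
      simp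
    rw [hjoin]
    conv_lhs => rw [hcs]
    rw [pvLoopA_tabbing tab mx ('\n' :: r) (Or.inr ⟨r, rfl⟩)]
    rw [pvLoopA_parsing tab mx ('\n' :: r) (Or.inr ⟨r, rfl⟩) _ hscan2]
    rw [pvLoopA.eq_def]
    simp only [if_true]
    rw [ih r.length hlen r rfl]
    simp [pvFormatLine]

-- ===== VERDICT (by name: the statement is the Claim_ definition above) =====
theorem indentation_formatter_spec : Claim_equal_indentation_formatter := by
  intro text tab_size max_budget _
  unfold Spec_indentation_formatter indentation_formatter indentation_formatter_alt
  simp only [pvLoopA_lines]
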